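-- pv_equiv track=rewrite | github.com/Mjvolk3/Swanki | scripts/zotero_paper_import.py | _labels_to_ranges
-- ===== SOURCE A (Python) =====
-- def _labels_to_ranges(labels: list[str]) -> list[tuple[int, int]]:
--     """Convert page labels to keep-ranges (0-based, end-exclusive)."""
--     ranges: list[tuple[int, int]] = []
--     start = None
--     for i, label in enumerate(labels):
--         if label == "keep":
--             if start is None:
--                 start = i
--         else:
--             if start is not None:
--                 ranges.append((start, i))
--                 start = None
--     if start is not None:
--         ranges.append((start, len(labels)))
--     return ranges
-- ===== SOURCE B (Python) =====
-- def _labels_to_ranges(labels: list[str]) -> list[tuple[int, int]]: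
--     """Convert page labels to keep-ranges (0-based, end-exclusive)."""
--     ranges: list[tuple[int, int]] = []
--     i, n = 0, len(labels)
--     while i < n:
--         j = i + 1
--         while j < n and labels[j] == labels[i]:
--             j += 1
--         if labels[i] == "keep":
--             ranges.append((i, j))
--         i = j
--     return ranges
-- ===== Notes on version B (the rewrite author's own statement) =====
-- stated objective: alternative
-- what changed: Replaces the flag/sentinel state machine (start=None bookkeeping with a post-loop flush) by a run-detection scan that advances over each maximal run of equal labels at once and emits a (i, j) range directly when the run's label is 'keep'; no sentinel and no final flush needed.
import Mathlib
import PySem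

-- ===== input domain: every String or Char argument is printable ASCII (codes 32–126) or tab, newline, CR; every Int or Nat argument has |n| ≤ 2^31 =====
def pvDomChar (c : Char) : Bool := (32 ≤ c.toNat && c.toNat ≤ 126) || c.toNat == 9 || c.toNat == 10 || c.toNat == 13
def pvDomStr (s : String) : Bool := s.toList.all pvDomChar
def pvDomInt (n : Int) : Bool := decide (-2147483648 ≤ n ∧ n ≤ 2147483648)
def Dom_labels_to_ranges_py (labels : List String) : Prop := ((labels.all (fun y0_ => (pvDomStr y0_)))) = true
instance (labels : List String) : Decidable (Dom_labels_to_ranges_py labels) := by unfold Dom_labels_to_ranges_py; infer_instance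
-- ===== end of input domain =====

-- B replaces A's start-sentinel state machine (with its post-loop flush) by a run-detection
-- scan that jumps over each maximal run of equal labels and emits a keep-range per "keep" run
-- (objective: alternative; same O(n) cost).

-- ===== PORT A =====
-- one loop iteration of A: state = (ranges, start)
def pvStepA (st : List (Int × Int) × Option Int) (p : Int × String) : List (Int × Int) × Option Int :=
  if p.2 == "keep" then
    match st.2 with
    | none => (st.1, some p.1)
    | some _ => st
  else
    match st.2 with
    | some a => (st.1 ++ [(a, p.1)], none)
    | none => st

def labels_to_ranges_py (labels : List String) : List (Int × Int) :=
  let s := (PySem.List.enumerate labels).foldl pvStepA ([], none)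
  match s.2 with
  | some a => s.1 ++ [(a, (labels.length : Int))]
  | none => s.1

-- ===== PORT B =====
-- Source B's outer while-loop: consume one maximal run of equal labels per call
-- (the inner 'while labels[j] == labels[i]' scan is the takeWhile/dropWhile on the tail)
def pvRuns (labels : List String) (i : Int) : List (Int × Int) :=
  match labels with
  | [] => []
  | l :: rest =>
    let n : Int := 1 + ((rest.takeWhile (fun x => x == l)).length : Int)
    (if l == "keep" then [(i, i + n)] else []) ++ pvRuns (rest.dropWhile (fun x => x == l)) (i + n)
termination_by labels.length
decreasing_by
  exact Nat.lt_succ_of_le (List.length_dropWhile_le _ _)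

def labels_to_ranges_py_alt (labels : List String) : List (Int × Int) :=
  pvRuns labels 0

-- ===== PRECONDITION & SPEC =====
def Spec_labels_to_ranges_py (labels : List String) (out : List (Int × Int)) : Prop := out = labels_to_ranges_py_alt labels
instance (labels : List String) (out : List (Int × Int)) : Decidable (Spec_labels_to_ranges_py labels out) := by unfold Spec_labels_to_ranges_py; infer_instance

-- ===== CLAIM (what is proved, stated in full; the proofs are below) =====
def Claim_equal_labels_to_ranges_py : Prop := ∀ (labels : List String), Dom_labels_to_ranges_py labels → Spec_labels_to_ranges_py labels (labels_to_ranges_py labels)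

-- ===== LEMMAS AND PROOFS =====

-- A's final flush, as a function of the loop's end state and len(labels)
def pvFinish (s : List (Int × Int) × Option Int) (e : Int) : List (Int × Int) :=
  match s.2 with
  | some a => s.1 ++ [(a, e)]
  | none => s.1

-- what B's run scan produces from position i when A's pending state is st
def pvCont (st : Option Int) (labels : List String) (i : Int) : List (Int × Int) :=
  match st with
  | none => pvRuns labels i
  | some a =>
    (a, i + ((labels.takeWhile (fun x => x == "keep")).length : Int))
      :: pvRuns (labels.dropWhile (fun x => x == "keep"))
           (i + ((labels.takeWhile (fun x => x == "keep")).length : Int))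

theorem pvRuns_arg (L : List String) {i j : Int} (h : i = j) : pvRuns L i = pvRuns L j := by rw [h]

-- skipping a run of equal non-"keep" labels does not change B's output
theorem pvSkipRun (rest : List String) (i : Int) (l : String) (h : (l == "keep") = false) :
    pvRuns (rest.dropWhile (fun x => x == l)) (i + ((rest.takeWhile (fun x => x == l)).length : Int))
      = pvRuns rest i := by
  match rest with
  | [] => simp
  | r :: rest' =>
    by_cases hr : (r == l) = true
    · have hrl : r = l := by simpa using hr
      subst hrl
      conv_rhs => rw [pvRuns]
      simp only [List.takeWhile_cons, List.dropWhile_cons, hr, if_true, h, Bool.false_eq_true,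
        if_false, List.nil_append, List.length_cons]
      exact pvRuns_arg _ (by push_cast; ring)
    · have hr' : (r == l) = false := by simpa using hr
      simp [hr']

theorem pvSkip (l : String) (rest : List String) (i : Int) (h : (l == "keep") = false) :
    pvRuns (l :: rest) i = pvRuns rest (i + 1) := by
  rw [pvRuns]
  simp only [h, Bool.false_eq_true, if_false, List.nil_append]
  rw [← pvSkipRun rest (i + 1) l h]
  exact pvRuns_arg _ (by push_cast; ring)

-- unfolding B's scan on a "keep"-headed list
theorem pvRuns_keep (rest : List String) (i : Int) :
    pvRuns ("keep" :: rest) i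
      = (i, i + 1 + ((rest.takeWhile (fun x => x == "keep")).length : Int))
        :: pvRuns (rest.dropWhile (fun x => x == "keep"))
             (i + 1 + ((rest.takeWhile (fun x => x == "keep")).length : Int)) := by
  rw [pvRuns]
  simp only [beq_self_eq_true, if_true, List.singleton_append]
  congr 1
  · congr 1; ring
  · exact pvRuns_arg _ (by ring)

theorem pvCont_some_keep (a : Int) (rest : List String) (i : Int) :
    pvCont (some a) ("keep" :: rest) i
      = (a, i + 1 + ((rest.takeWhile (fun x => x == "keep")).length : Int))
        :: pvRuns (rest.dropWhile (fun x => x == "keep"))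
             (i + 1 + ((rest.takeWhile (fun x => x == "keep")).length : Int)) := by
  unfold pvCont
  simp only [List.takeWhile_cons, List.dropWhile_cons, beq_self_eq_true, if_true, List.length_cons]
  congr 1
  · congr 1; push_cast; ring
  · exact pvRuns_arg _ (by push_cast; ring)

theorem pvCont_some_other (a : Int) (l : String) (rest : List String) (i : Int)
    (h : (l == "keep") = false) :
    pvCont (some a) (l :: rest) i = (a, i) :: pvRuns (l :: rest) i := by
  unfold pvCont
  simp [h]

theorem pvMain (labels : List String) : ∀ (acc : List (Int × Int)) (st : Option Int) (i : Int),
    pvFinish ((PySem.List.enumerate labels i).foldl pvStepA (acc, st)) (i + (labels.length : Int))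
      = acc ++ pvCont st labels i := by
  induction labels with
  | nil =>
    intro acc st i
    cases st <;> simp [PySem.List.enumerate_nil, pvFinish, pvCont, pvRuns]
  | cons l rest ih =>
    intro acc st i
    rw [PySem.List.enumerate_cons]
    have h2 : (((l :: rest).length : Nat) : Int) = 1 + (rest.length : Int) := by
      simp; ring
    rw [h2, ← Int.add_assoc]
    by_cases hk : (l == "keep") = true
    · have hl : l = "keep" := by simpa using hk
      subst hl
      cases st with
      | none =>
        simp only [List.foldl_cons, pvStepA, hk, if_true]
        rw [ih acc (some i) (i + 1)]
        show acc ++ pvCont (some i) rest (i + 1) = acc ++ pvRuns ("keep" :: rest) i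
        rw [pvRuns_keep, pvCont]
      | some a =>
        simp only [List.foldl_cons, pvStepA, hk, if_true]
        rw [ih acc (some a) (i + 1)]
        rw [pvCont_some_keep]
        rw [pvCont]
    · have hk' : (l == "keep") = false := by simpa using hk
      cases st with
      | none =>
        simp only [List.foldl_cons, pvStepA, hk', Bool.false_eq_true, if_false]
        rw [ih acc none (i + 1)]
        show acc ++ pvRuns rest (i + 1) = acc ++ pvRuns (l :: rest) i
        rw [pvSkip l rest i hk']
      | some a =>
        simp only [List.foldl_cons, pvStepA, hk', Bool.false_eq_true, if_false]
        rw [ih (acc ++ [(a, i)]) none (i + 1)]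
        rw [pvCont_some_other a l rest i hk', pvSkip l rest i hk']
        show (acc ++ [(a, i)]) ++ pvRuns rest (i + 1) = acc ++ (a, i) :: pvRuns rest (i + 1)
        simp

-- ===== VERDICT (by name: the statement is the Claim_ definition above) =====
theorem labels_to_ranges_py_spec : Claim_equal_labels_to_ranges_py := by
  intro labels _
  unfold Spec_labels_to_ranges_py labels_to_ranges_py labels_to_ranges_py_alt
  have h := pvMain labels [] none 0
  rw [Int.zero_add] at h
  simpa [pvFinish, pvCont] using h
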